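-- pv_equiv track=rewrite | github.com/devyzz/yeardream-python | _복습/[배열]구슬넣기.py | processBeads
-- ===== SOURCE A (Python) =====
-- class ListPipe:
--     def __init__(self):
--         self.beads = []
--
--     def addLeft(self,x):
--         self.beads.insert(0,x)
--
--     def addRight(self, x):
--         self.beads.append(x)
--
--     def getPipe(self):
--         return(self.beads)
--
-- def processBeads(myInput):
--
--     # myInput[i][0] : i번째에 넣는 구슬의 번호
--     # myInput[i][1] : i번째에 넣는 방향
--     #
--     # 예를 들어, 예제의 경우
--     #
--     # myInput[0][0] = 1, myInput[0][1] = 0,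
--     # myInput[1][0] = 2, myInput[1][1] = 1,
--     # myInput[2][0] = 3, myInput[2][1] = 0
--
--     pipe = ListPipe()
--
--     for target in myInput:
--         num = target[0]
--         direction = target[1]
--
--         if direction == 0:
--             pipe.addLeft(num)
--         else:
--             pipe.addRight(num)
--
--     return pipe.getPipe()
-- ===== SOURCE B (Python) =====
-- def processBeads(myInput):
--     # direction-0 beads end up in reverse encounter order at the front,
--     # all others keep encounter order at the back
--     zeros = [t[0] for t in reversed(myInput) if t[1] == 0]
--     others = [t[0] for t in myInput if t[1] != 0]
--     return zeros + others
-- ===== Notes on version B (the rewrite author's own statement) =====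
-- stated objective: simpler
-- what changed: B has no loop state at all: two filter/map comprehensions (one over the reversed input selecting direction-0 beads, one over the input selecting the rest) concatenated, replacing A's stateful loop with positional front-insertions into one shared list.
import Mathlib
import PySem

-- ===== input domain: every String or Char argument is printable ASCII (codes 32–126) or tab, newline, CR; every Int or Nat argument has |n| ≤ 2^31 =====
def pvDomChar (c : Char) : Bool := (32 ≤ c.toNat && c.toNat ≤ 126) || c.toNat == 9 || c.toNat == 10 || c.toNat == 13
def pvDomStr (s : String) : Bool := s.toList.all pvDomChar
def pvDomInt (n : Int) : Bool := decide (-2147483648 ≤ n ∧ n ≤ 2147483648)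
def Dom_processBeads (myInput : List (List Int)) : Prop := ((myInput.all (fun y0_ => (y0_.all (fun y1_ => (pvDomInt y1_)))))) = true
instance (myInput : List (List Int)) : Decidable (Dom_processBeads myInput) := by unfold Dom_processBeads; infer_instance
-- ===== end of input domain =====

-- B is stateless: two filter/map comprehensions (direction-0 beads taken from the reversed
-- input, the rest in order) concatenated, instead of A's loop front-inserting into one list
-- (objective: simpler).

-- ===== PORT A =====
-- for target in myInput: num = target[0]; direction = target[1];
-- if direction == 0: pipe.insert(0, num) else: pipe.append(num)
def processBeads (myInput : List (List Int)) : List Int :=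
  myInput.foldl (fun beads target =>
    let num := (PySem.List.pyGet? target 0).getD 0       -- target[0]; none (IndexError) excluded by Pre_
    let direction := (PySem.List.pyGet? target 1).getD 0 -- target[1]; none (IndexError) excluded by Pre_
    if direction == 0 then num :: beads                  -- beads.insert(0, num)
    else beads ++ [num]) []                              -- beads.append(num)

-- ===== PORT B =====
-- zeros = [t[0] for t in reversed(myInput) if t[1] == 0]; others = [t[0] for t in myInput if t[1] != 0]
def processBeads_alt (myInput : List (List Int)) : List Int :=
  let zeros := (myInput.reverse.filter
      (fun t => (PySem.List.pyGet? t 1).getD 0 == 0)).map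
      (fun t => (PySem.List.pyGet? t 0).getD 0)
  let others := (myInput.filter
      (fun t => !((PySem.List.pyGet? t 1).getD 0 == 0))).map
      (fun t => (PySem.List.pyGet? t 0).getD 0)
  zeros ++ others

-- ===== PRECONDITION & SPEC =====
-- A raises IndexError when some row has fewer than 2 elements (target[0]/target[1]); exactly those inputs are excluded.
def Pre_processBeads (myInput : List (List Int)) : Prop :=
  ∀ row ∈ myInput, 2 ≤ row.length
instance (myInput : List (List Int)) : Decidable (Pre_processBeads myInput) := by
  unfold Pre_processBeads; infer_instance
def pvWitness_processBeads : List (List Int) := [[1, 0], [2, 1], [3, 0]]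

def Spec_processBeads (myInput : List (List Int)) (out : List Int) : Prop := out = processBeads_alt myInput
instance (myInput : List (List Int)) (out : List Int) : Decidable (Spec_processBeads myInput out) := by unfold Spec_processBeads; infer_instance

-- ===== CLAIM =====
def Claim_equal_processBeads : Prop := ∀ (myInput : List (List Int)), Dom_processBeads myInput → Pre_processBeads myInput → Spec_processBeads myInput (processBeads myInput)

-- ===== LEMMAS AND PROOFS =====
-- Invariant: A's loop run over xs starting from Z.reverse ++ O yields
-- (Z ++ zeros-of-xs).reverse ++ O ++ others-of-xs.
theorem processBeads_inv (xs : List (List Int)) :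
    ∀ (Z O : List Int),
      xs.foldl (fun beads target =>
        let num := (PySem.List.pyGet? target 0).getD 0
        let direction := (PySem.List.pyGet? target 1).getD 0
        if direction == 0 then num :: beads
        else beads ++ [num]) (Z.reverse ++ O)
      = (Z ++ (xs.filter (fun t => (PySem.List.pyGet? t 1).getD 0 == 0)).map
            (fun t => (PySem.List.pyGet? t 0).getD 0)).reverse
        ++ O
        ++ (xs.filter (fun t => !((PySem.List.pyGet? t 1).getD 0 == 0))).map
            (fun t => (PySem.List.pyGet? t 0).getD 0) := by
  induction xs with
  | nil => intro Z O; simp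
  | cons x xs ih =>
    intro Z O
    simp only [List.foldl_cons, List.filter_cons]
    by_cases h : ((PySem.List.pyGet? x 1).getD 0 == 0) = true
    · have := ih (Z ++ [(PySem.List.pyGet? x 0).getD 0]) O
      simp only [h, if_pos] at *
      simpa using this
    · have := ih Z (O ++ [(PySem.List.pyGet? x 0).getD 0])
      simp only [h, Bool.not_eq_true] at *
      simpa using this

-- ===== VERDICT =====
theorem processBeads_spec : Claim_equal_processBeads := by
  intro myInput _ _
  unfold Spec_processBeads processBeads processBeads_alt
  have := processBeads_inv myInput [] []
  simpa [List.filter_reverse, List.map_reverse] using this
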